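-- pv_equiv track=rewrite | github.com/santiagofelizzola/python_practice | test.py | min_unique_ids
-- ===== SOURCE A (Python) =====
-- def min_unique_ids(arr, m):
--     # Count the occurrences of each element in the array
--     counts = {}
--     for num in arr:
--         counts[num] = counts.get(num, 0) + 1
--
--     # Sort the elements based on their occurrences in descending order
--     sorted_counts = sorted(counts.items(), key=lambda x: x[1], reverse=True)
--     print (counts)
--
--     # Remove the least frequent elements until the required number is reached
--     for i in range(min(m, len(sorted_counts))):
--         counts[sorted_counts[i][0]] -= 1
--
--     # Count the remaining unique elements
--     remaining_unique = sum(1 for count in counts.values() if count > 0)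
--
--     print (counts)
--     # print (sorted_counts)
--
--
--     return remaining_unique -1
-- ===== SOURCE B (Python) =====
-- def min_unique_ids(arr, m):
--     # One pass to count; the answer follows arithmetically: decrementing the
--     # top-min(m, U) frequencies removes an id only when its count is 1, and the
--     # ids with count 1 sort last, so hits = max(0, min(m, U) - #(counts > 1)).
--     counts = {}
--     for num in arr:
--         counts[num] = counts.get(num, 0) + 1
--     u = len(counts)
--     g = sum(1 for c in counts.values() if c > 1)
--     k = min(m, u)
--     hits = max(0, k - g)
--     return u - hits - 1
-- ===== Notes on version B (the rewrite author's own statement) =====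
-- stated objective: faster
-- what changed: Replaces the descending sort of the frequency table and the per-index decrement loop by a single counting pass plus a closed-form hit count max(0, min(m, U) - #(counts > 1)), since decrementing a top frequency removes an id exactly when its count is 1 and those sort last.
import Mathlib
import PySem

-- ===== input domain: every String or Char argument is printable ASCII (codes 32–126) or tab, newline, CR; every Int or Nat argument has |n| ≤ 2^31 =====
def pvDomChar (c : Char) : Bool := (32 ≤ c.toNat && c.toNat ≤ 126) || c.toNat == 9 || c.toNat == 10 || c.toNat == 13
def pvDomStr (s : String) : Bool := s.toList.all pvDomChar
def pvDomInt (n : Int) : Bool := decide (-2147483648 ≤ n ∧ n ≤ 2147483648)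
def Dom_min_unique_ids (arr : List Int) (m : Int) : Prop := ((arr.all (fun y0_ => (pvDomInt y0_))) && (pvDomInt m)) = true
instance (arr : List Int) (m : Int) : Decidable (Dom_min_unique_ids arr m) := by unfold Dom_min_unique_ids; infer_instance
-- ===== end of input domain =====

-- Faster B: computes the answer arithmetically, hits = max(0, min(m, U) - #(counts > 1)),
-- instead of sorting the frequency table; equivalence concerns the return value only
-- (A also prints the counts dict to stdout).


-- ===== PORT A =====
def min_unique_ids (arr : List Int) (m : Int) : Int :=
  let counts : PySem.Dict Int Int := arr.foldl (fun d num => d.modify num 0 (· + 1)) PySem.Dict.empty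
  let sorted_counts := PySem.List.sorted counts.items (fun x => x.2) true
  let counts2 := (PySem.List.pyRange 0 (min m (sorted_counts.length : Int)) 1).foldl
      (fun d i => d.modify (PySem.List.pyGetD sorted_counts i (0, 0)).1 0 (· - 1)) counts
  let remaining : Int := (counts2.values.countP (fun count => decide (0 < count)) : Nat)
  remaining - 1

-- ===== PORT B =====
def min_unique_ids_alt (arr : List Int) (m : Int) : Int :=
  let counts : PySem.Dict Int Int := arr.foldl (fun d num => d.modify num 0 (· + 1)) PySem.Dict.empty
  let u : Int := counts.size
  let g : Int := (counts.values.countP (fun c => decide (1 < c)) : Nat)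
  let k := min m u
  let hits := max 0 (k - g)
  u - hits - 1

-- ===== PRECONDITION & SPEC =====
-- A is total on List Int × Int (the indexed key always exists), so no Pre_ is needed.
def Spec_min_unique_ids (arr : List Int) (m : Int) (out : Int) : Prop := out = min_unique_ids_alt arr m
instance (arr : List Int) (m : Int) (out : Int) : Decidable (Spec_min_unique_ids arr m out) := by unfold Spec_min_unique_ids; infer_instance

-- ===== CLAIM (what is proved, stated in full; the proofs are below) =====
def Claim_equal_min_unique_ids : Prop := ∀ (arr : List Int) (m : Int), Dom_min_unique_ids arr m → Spec_min_unique_ids arr m (min_unique_ids arr m)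

-- ===== LEMMAS AND PROOFS =====

theorem foldl_idx_take {α β : Type} (xs : List α) (f : β → α → β) (d0 : α) (b : Int)
    (hb : b ≤ (xs.length : Int)) (init : β) :
    (PySem.List.pyRange 0 b 1).foldl (fun d i => f d (PySem.List.pyGetD xs i d0)) init
      = (xs.take b.toNat).foldl f init := by
  by_cases hb0 : b ≤ 0
  · rw [PySem.List.pyRange_one_eq_nil hb0]
    have : b.toNat = 0 := by omega
    simp [this]
  · have hb0' : 0 < b := by omega
    have hlen : ((xs.take b.toNat).length : Int) = b := by
      simp [List.length_take]; omega
    have hstep : (PySem.List.pyRange 0 b 1).foldl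
        (fun d i => f d (PySem.List.pyGetD xs i d0)) init
        = (PySem.List.pyRange 0 (((xs.take b.toNat).length : Nat) : Int) 1).foldl
        (fun d i => f d (PySem.List.pyGetD (xs.take b.toNat) i d0)) init := by
      rw [hlen]
      apply PySem.List.foldl_congr_mem
      intro acc i hi
      rw [PySem.List.mem_pyRange_one] at hi
      rw [PySem.List.pyGetD_eq_getElem _ d0 hi.1 (by omega),
          PySem.List.pyGetD_eq_getElem _ d0 hi.1 (by rw [hlen]; exact hi.2)]
      simp [List.getElem_take]
    rw [hstep, PySem.List.foldl_pyRange_zero_pyGetD']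

theorem getD_foldl_dec (P : List (Int × Int)) (d : PySem.Dict Int Int)
    (hP : (P.map Prod.fst).Nodup) (k : Int) :
    (P.foldl (fun d p => d.modify p.1 0 (· - 1)) d).getD k 0
      = d.getD k 0 - (if k ∈ P.map Prod.fst then 1 else 0) := by
  induction P generalizing d with
  | nil => simp
  | cons p t ih =>
    simp only [List.map_cons, List.nodup_cons] at hP
    simp only [List.foldl_cons, ih _ hP.2, PySem.Dict.getD_modify, List.map_cons, List.mem_cons]
    by_cases hk : k = p.1
    · subst hk
      simp [hP.1]
    · simp only [hk, if_false]
      split <;> simp [*]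

theorem keys_foldl_dec (P : List (Int × Int)) (d : PySem.Dict Int Int)
    (h : ∀ p ∈ P, p.1 ∈ d.keys) :
    (P.foldl (fun d p => d.modify p.1 0 (· - 1)) d).keys = d.keys := by
  induction P generalizing d with
  | nil => simp
  | cons p t ih =>
    have hc : d.contains p.1 = true := by
      rw [PySem.Dict.contains_eq_decide_mem_keys]
      exact decide_eq_true (h p (List.mem_cons_self ..))
    have hk : (d.modify p.1 0 (· - 1)).keys = d.keys := by
      rw [PySem.Dict.keys_modify, PySem.Dict.keys_insert_of_contains _ _ hc]
    simp only [List.foldl_cons]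
    rw [ih _ (by intro q hq; rw [hk]; exact h q (List.mem_cons_of_mem _ hq)), hk]

theorem countP_take_desc (L : List (Int × Int))
    (hd : L.Pairwise (fun a b => b.2 ≤ a.2)) (h1 : ∀ p ∈ L, 1 ≤ p.2) (K : Nat) :
    (L.take K).countP (fun p => decide (1 < p.2))
      = min K (L.countP (fun p => decide (1 < p.2))) := by
  induction L generalizing K with
  | nil => simp
  | cons p t ih =>
    cases K with
    | zero => simp
    | succ K =>
      simp only [List.take_succ_cons, List.countP_cons]
      rw [List.pairwise_cons] at hd
      by_cases hp : 1 < p.2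
      · simp only [hp, decide_true, if_pos trivial]
        rw [ih hd.2 (fun q hq => h1 q (List.mem_cons_of_mem _ hq)) K]
        omega
      · have hp1 : p.2 = 1 := le_antisymm (by omega) (h1 p (List.mem_cons_self ..))
        have ht : ∀ q ∈ t, ¬ (1 < q.2) := fun q hq => by have := hd.1 q hq; omega
        have htc : t.countP (fun p => decide (1 < p.2)) = 0 :=
          List.countP_eq_zero.mpr (by intro q hq; simpa using ht q hq)
        have htk : (t.take K).countP (fun p => decide (1 < p.2)) = 0 :=
          List.countP_eq_zero.mpr (by intro q hq; simpa using ht q (List.mem_of_mem_take hq))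
        simp [hp1, htc, htk]

theorem main_eq (arr : List Int) (m : Int) :
    min_unique_ids arr m = min_unique_ids_alt arr m := by
  have hA : min_unique_ids arr m
      = (((((PySem.List.pyRange 0 (min m (((PySem.List.sorted (PySem.Dict.counter arr).items
              (fun x => x.2) true).length : Int))) 1).foldl
          (fun d i => d.modify (PySem.List.pyGetD (PySem.List.sorted (PySem.Dict.counter arr).items
              (fun x => x.2) true) i (0, 0)).1 0 (· - 1))
          (PySem.Dict.counter arr)).values.countP (fun count => decide (0 < count))) : Nat) : Int)
        - 1 := rfl
  have hB : min_unique_ids_alt arr m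
      = ((PySem.Dict.counter arr).size : Int)
          - max 0 (min m ((PySem.Dict.counter arr).size : Int)
            - (((PySem.Dict.counter arr).values.countP (fun c => decide (1 < c)) : Nat) : Int))
          - 1 := rfl
  rw [hA, hB]
  set C : PySem.Dict Int Int := PySem.Dict.counter arr with hC
  set S := PySem.Set.ofList arr with hS
  set L := PySem.List.sorted C.items (fun x => x.2) true with hL
  set C2 := (PySem.List.pyRange 0 (min m ((L.length : Int))) 1).foldl
      (fun d i => d.modify (PySem.List.pyGetD L i (0, 0)).1 0 (· - 1)) C with hC2
  have hitems : C.items = S.map (fun k => (k, (arr.count k : Int))) :=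
    PySem.Dict.items_counter arr
  have hkeysC : C.keys = S := PySem.Dict.keys_counter arr
  have hgetC : ∀ k, C.getD k 0 = (arr.count k : Int) := fun k => PySem.Dict.getD_counter arr k
  have hSnd : S.Nodup := PySem.Set.nodup_ofList arr
  set L := PySem.List.sorted C.items (fun x => x.2) true with hL
  have hperm : L.Perm C.items := PySem.List.sorted_perm _ _ _
  -- elements of L: keys in S, values = the multiplicities, all >= 1
  have hmemL : ∀ p ∈ L, p.1 ∈ S ∧ p.2 = (arr.count p.1 : Int) ∧ 1 ≤ p.2 := by
    intro p hp
    have hpi : p ∈ C.items := hperm.mem_iff.mp hp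
    rw [hitems] at hpi
    obtain ⟨k, hk, hkp⟩ := List.mem_map.mp hpi
    subst hkp
    refine ⟨hk, rfl, ?_⟩
    have hka : k ∈ arr := (PySem.Set.mem_ofList arr k).mp hk
    have := List.count_pos_iff.mpr hka
    omega
  have hfstitems : C.items.map Prod.fst = S := by
    rw [hitems, List.map_map]
    show List.map (fun k => k) _ = _
    simp
  have hfstnd : (L.map Prod.fst).Nodup := by
    refine (hperm.map Prod.fst).nodup_iff.mpr ?_
    rw [hfstitems]; exact hSnd
  set K : Nat := (min m (L.length : Int)).toNat with hK
  have hKle : K ≤ L.length := by omega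
  set T := L.take K with hT
  -- the index loop is a fold over the prefix T
  have hfold : C2 = T.foldl (fun d p => d.modify p.1 0 (· - 1)) C := by
    rw [hC2]
    exact foldl_idx_take L (fun d p => d.modify p.1 0 (· - 1)) (0, 0) _ (min_le_right _ _) C
  have hTfst : ∀ p ∈ T, p.1 ∈ C.keys := by
    intro p hp
    rw [hkeysC]
    exact (hmemL p (List.mem_of_mem_take hp)).1
  have hkeys2 : C2.keys = S := by rw [hfold, keys_foldl_dec _ _ hTfst, hkeysC]
  have hTnd : (T.map Prod.fst).Nodup := by
    rw [hT, List.map_take]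
    exact (List.map Prod.fst L).take_sublist K |>.nodup hfstnd
  -- final lookups after the decrement loop
  have hget : ∀ k, C2.getD k 0 = C.getD k 0 - (if k ∈ T.map Prod.fst then 1 else 0) := by
    rw [hfold]; exact fun k => getD_foldl_dec T C hTnd k
  have hvals2 : C2.values = S.map (fun k => C2.getD k 0) := by
    rw [← hkeys2]
    exact PySem.Dict.values_eq_map_keys C2 (hkeys2 ▸ hSnd) 0
  -- the count of still-positive multiplicities
  have hcount : C2.values.countP (fun c => decide (0 < c))
      = (T.countP (fun p => decide (1 < p.2))) + (L.length - K) := by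
    rw [hvals2, List.countP_map]
    have h1 : S.countP (fun k => decide (0 < C2.getD k 0))
        = C.items.countP (fun p => decide (0 < C2.getD p.1 0)) := by
      rw [hitems, List.countP_map]
      rfl
    have h2 : C.items.countP (fun p => decide (0 < C2.getD p.1 0))
        = L.countP (fun p => decide (0 < C2.getD p.1 0)) := (hperm.countP_eq _).symm
    have h3 : L = T ++ L.drop K := (List.take_append_drop K L).symm
    have hdropfst : ∀ p ∈ L.drop K, p.1 ∉ T.map Prod.fst := by
      intro p hp hmem
      have hsplit : L.map Prod.fst = T.map Prod.fst ++ (L.drop K).map Prod.fst := by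
        rw [hT, ← List.map_append, List.take_append_drop]
      have hnd := hfstnd
      rw [hsplit, List.nodup_append] at hnd
      exact hnd.2.2 p.1 hmem p.1 (List.mem_map_of_mem hp) rfl
    have hctake : T.countP (fun p => decide (0 < C2.getD p.1 0))
        = T.countP (fun p => decide (1 < p.2)) := by
      apply List.countP_congr
      intro p hp
      have hc := hget p.1
      have hv := (hmemL p (List.mem_of_mem_take hp)).2.1
      rw [hc, hgetC p.1, ← hv, if_pos (List.mem_map_of_mem hp)]
      simp only [decide_eq_true_eq]
      omega
    have hcdrop : (L.drop K).countP (fun p => decide (0 < C2.getD p.1 0))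
        = (L.drop K).length := by
      rw [List.countP_eq_length]
      intro p hp
      have hc := hget p.1
      have hmem := hmemL p (List.mem_of_mem_drop hp)
      rw [hc, hgetC p.1, ← hmem.2.1, if_neg (hdropfst p hp)]
      have := hmem.2.2
      simp only [decide_eq_true_eq]
      omega
    calc S.countP (fun k => decide (0 < C2.getD k 0))
        = L.countP (fun p => decide (0 < C2.getD p.1 0)) := by rw [h1, h2]
      _ = T.countP _ + (L.drop K).countP _ := by
          conv_lhs => rw [h3]
          rw [List.countP_append]
      _ = T.countP (fun p => decide (1 < p.2)) + (L.length - K) := by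
          rw [hctake, hcdrop, List.length_drop]
  -- in the descending list the prefix count of values > 1 is clamped
  have hdesc : L.Pairwise (fun a b => b.2 ≤ a.2) := PySem.List.sorted_pairwise_rev _ _
  have htake : T.countP (fun p => decide (1 < p.2))
      = min K (L.countP (fun p => decide (1 < p.2))) :=
    countP_take_desc L hdesc (fun p hp => (hmemL p hp).2.2) K
  -- B's quantities
  have hsize : C.size = C.items.length := rfl
  have hvalsC : C.values = C.items.map Prod.snd := rfl
  have hg : C.values.countP (fun c => decide (1 < c))
      = L.countP (fun p => decide (1 < p.2)) := by
    rw [hvalsC, List.countP_map, hperm.countP_eq]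
    rfl
  -- assemble and finish arithmetically
  rw [hcount, htake, hsize, hg]
  have hlen' : C.items.length = L.length := hperm.length_eq.symm
  rw [hlen']
  set G := L.countP (fun p => decide (1 < p.2)) with hG
  have hGle : G ≤ L.length := List.countP_le_length
  push_cast
  omega

-- ===== VERDICT (by name: the statement is the Claim_ definition above) =====
theorem min_unique_ids_spec : Claim_equal_min_unique_ids := by
  intro arr m _
  exact main_eq arr m
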